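-- pv_equiv track=rewrite | github.com/seanwoori/TIL | handouts/02/230224/exam/16650/16650.py | mx
-- ===== SOURCE A (Python) =====
-- def mx(l):
--     for i in range(len(l)-1):
--         # max 일때, lst[i]가 max(lst[i+1:j]) 보다 작으면 for loop 시작
--         if l[i]<max(l[i+1:]) and max(l[i+1:])!=0:
--             # 가장 낮은 자리수에 있는 것과 교환
--             for j in range(i+1, len(l))[::-1]:
--                 if l[j]==max(l[i+1:]):
--                     l[i],l[j]=l[j],l[i]
--                     return l
--     return l
-- ===== SOURCE B (Python) =====
-- def mx(l):
--     # O(n): right-to-left pass precomputes, for each position, the max of the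
--     # suffix and the last index achieving it; then one left scan finds the
--     # first position to improve and swaps in place (mutates l, like A).
--     n = len(l)
--     suf = []  # built back-to-front; suf[i] = (max of l[i:], last index of that max)
--     m, j = None, -1
--     for i in range(n - 1, -1, -1):
--         if m is None or l[i] > m:
--             m, j = l[i], i
--         suf.append((m, j))
--     suf.reverse()
--     for i in range(n - 1):
--         m, j = suf[i + 1]
--         if l[i] < m and m != 0:
--             l[i], l[j] = l[j], l[i]
--             return l
--     return l
-- ===== Notes on version B (the rewrite author's own statement) =====
-- stated objective: faster
-- what changed: A recomputes max(l[i+1:]) from scratch for every i (quadratic); B does one right-to-left pass precomputing, for each position, the suffix maximum together with the last index achieving it, then a single left scan finds the first improvable position and swaps in place.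
import Mathlib
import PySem

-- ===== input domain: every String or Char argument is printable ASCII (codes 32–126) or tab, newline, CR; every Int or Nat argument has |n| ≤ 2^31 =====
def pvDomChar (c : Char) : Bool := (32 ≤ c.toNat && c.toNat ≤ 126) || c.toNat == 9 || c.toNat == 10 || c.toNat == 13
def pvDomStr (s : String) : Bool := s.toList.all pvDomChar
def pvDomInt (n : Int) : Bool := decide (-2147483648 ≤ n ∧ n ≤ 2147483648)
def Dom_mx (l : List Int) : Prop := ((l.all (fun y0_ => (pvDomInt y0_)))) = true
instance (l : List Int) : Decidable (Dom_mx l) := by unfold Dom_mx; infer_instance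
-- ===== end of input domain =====

-- B replaces A's repeated rescans of max(l[i+1:]) by one right-to-left pass that
-- precomputes (suffix max, last index of it), then a single left scan swaps; both
-- Pythons mutate l in place identically, the theorems are about the return value.

-- ===== PORT A =====
-- inner loop: 'for j in range(i+1, len(l))[::-1]: if l[j]==m: swap; return l'
def mxInner (l : List Int) (i m : Int) : List Int → Option (List Int)
  | [] => none
  | j :: js =>
    if PySem.List.pyGetD l j 0 = m then
      some (PySem.List.pySetD (PySem.List.pySetD l i (PySem.List.pyGetD l j 0)) j
              (PySem.List.pyGetD l i 0))
    else mxInner l i m js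

-- outer loop over i ∈ range(len(l)-1); max(l[i+1:]) raises on [] so max? = none is
-- the raising branch (unreachable: the slice is nonempty for every visited i);
-- range(i+1,len(l))[::-1] is the reverse of the range (PySem.List.slice?_none_none_neg_one)
def mxOuter (l : List Int) : List Int → List Int
  | [] => l
  | i :: is =>
    match PySem.List.max? (PySem.List.slice l (some (i + 1)) none) (fun y => y) with
    | none => mxOuter l is
    | some m =>
      if PySem.List.pyGetD l i 0 < m ∧ m ≠ 0 then
        match mxInner l i m ((PySem.List.pyRange (i + 1) (l.length : Int) 1).reverse) with
        | some r => r
        | none => mxOuter l is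
      else mxOuter l is

def mx (l : List Int) : List Int :=
  mxOuter l (PySem.List.pyRange 0 ((l.length : Int) - 1) 1)

-- ===== PORT B =====
-- first loop of Source B: right-to-left pass; head of (bSuf xs i) is (max of xs, last
-- absolute index of that max), built back-to-front exactly as Source B appends+reverses
def bSuf : List Int → Int → List (Int × Int)
  | [], _ => []
  | x :: xs, i =>
    match bSuf xs (i + 1) with
    | [] => [(x, i)]
    | (m, j) :: rest => if x > m then (x, i) :: (m, j) :: rest else (m, j) :: (m, j) :: rest

-- second loop of Source B: for i in range(n-1), read suf[i+1], swap at first hit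
def bScan (l : List Int) : List Int → List (Int × Int) → Int → List Int
  | x :: xs, _ :: (m, j) :: suf, i =>
    if x < m ∧ m ≠ 0 then
      PySem.List.pySetD (PySem.List.pySetD l i (PySem.List.pyGetD l j 0)) j x
    else bScan l xs ((m, j) :: suf) (i + 1)
  | _, _, _ => l

def mx_alt (l : List Int) : List Int := bScan l l (bSuf l 0) 0

-- ===== PRECONDITION & SPEC =====
def Spec_mx (l : List Int) (out : List Int) : Prop := out = mx_alt l
instance (l : List Int) (out : List Int) : Decidable (Spec_mx l out) := by unfold Spec_mx; infer_instance

-- ===== CLAIM (what is proved, stated in full; the proofs are below) =====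
def Claim_equal_mx : Prop := ∀ (l : List Int), Dom_mx l → Spec_mx l (mx l)

-- ===== LEMMAS AND PROOFS =====

theorem bSuf_cons (x : Int) (xs : List Int) (i : Int) :
    bSuf (x :: xs) i = match bSuf xs (i + 1) with
      | [] => [(x, i)]
      | (m, j) :: rest => if x > m then (x, i) :: (m, j) :: rest else (m, j) :: (m, j) :: rest := rfl

theorem bScan_cons (l : List Int) (x : Int) (xs : List Int) (p : Int × Int) (m j : Int)
    (suf : List (Int × Int)) (i : Int) :
    bScan l (x :: xs) (p :: (m, j) :: suf) i =
      if x < m ∧ m ≠ 0 then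
        PySem.List.pySetD (PySem.List.pySetD l i (PySem.List.pyGetD l j 0)) j x
      else bScan l xs ((m, j) :: suf) (i + 1) := rfl

theorem mxOuter_cons (l : List Int) (i : Int) (is : List Int) :
    mxOuter l (i :: is) =
      match PySem.List.max? (PySem.List.slice l (some (i + 1)) none) (fun y => y) with
      | none => mxOuter l is
      | some m =>
        if PySem.List.pyGetD l i 0 < m ∧ m ≠ 0 then
          match mxInner l i m ((PySem.List.pyRange (i + 1) (l.length : Int) 1).reverse) with
          | some r => r
          | none => mxOuter l is
        else mxOuter l is := rfl

theorem mxOuter_cons_some (l : List Int) (i m : Int) (is : List Int)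
    (h : PySem.List.max? (PySem.List.slice l (some (i + 1)) none) (fun y => y) = some m) :
    mxOuter l (i :: is) =
      if PySem.List.pyGetD l i 0 < m ∧ m ≠ 0 then
        match mxInner l i m ((PySem.List.pyRange (i + 1) (l.length : Int) 1).reverse) with
        | some r => r
        | none => mxOuter l is
      else mxOuter l is := by
  rw [mxOuter_cons, h]

theorem bSuf_cons₂ (x y : Int) (ys : List Int) (i M J : Int) (tail : List (Int × Int))
    (h : bSuf (y :: ys) (i + 1) = (M, J) :: tail) :
    bSuf (x :: y :: ys) i =
      if x > M then (x, i) :: (M, J) :: tail else (M, J) :: (M, J) :: tail := by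
  rw [bSuf_cons, h]

theorem bSuf_spec (ys : List Int) : ∀ (y : Int) (i : Int), ∃ (M : Int) (r : Nat) (tail : List (Int × Int)),
    bSuf (y :: ys) i = (M, i + (r : Int)) :: tail ∧
    M = ys.foldl max y ∧
    r < ys.length + 1 ∧
    (y :: ys)[r]? = some M ∧
    ∀ (k : Nat) (hk : k < ys.length + 1), r < k → (y :: ys)[k] ≠ M := by
  induction ys with
  | nil =>
    intro y i
    refine ⟨y, 0, [], by simp [bSuf], by simp, by simp, by simp, ?_⟩
    intro k hk hk0; simp at hk; omega
  | cons z zs ih =>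
    intro y i
    obtain ⟨M', r', tail', heq, hM', hr', hget', hlast'⟩ := ih z (i + 1)
    have hbound : ∀ w ∈ z :: zs, w ≤ M' := by
      intro w hw
      rcases List.mem_cons.mp hw with h | h
      · subst h hM'; exact (PySem.List.le_foldl_max zs w).1
      · subst hM'; exact (PySem.List.le_foldl_max zs z).2 w h
    have hfold : (z :: zs).foldl max y = max y (zs.foldl max z) := by
      show (zs.foldl max (max y z)) = _
      exact List.foldl_assoc
    by_cases hgt : y > M'
    · refine ⟨y, 0, (M', (i+1) + (r' : Int)) :: tail', ?_, ?_, by simp, by simp, ?_⟩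
      · rw [bSuf_cons, heq]; simp [hgt]
      · rw [hfold, ← hM', max_eq_left (le_of_lt hgt)]
      · intro k hk hk0
        match k, hk0 with
        | (k' + 1), _ =>
          have h1 : (y :: z :: zs)[k' + 1] = (z :: zs)[k']'(by simpa using hk) := by simp
          rw [h1]
          exact ne_of_lt (lt_of_le_of_lt (hbound _ (List.getElem_mem _)) hgt)
    · refine ⟨M', r' + 1, (M', (i+1) + (r' : Int)) :: tail', ?_, ?_,
        by simp only [List.length_cons]; omega, ?_, ?_⟩
      · have h2 : i + ((r' + 1 : Nat) : Int) = (i + 1) + (r' : Int) := by push_cast; ring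
        rw [h2, bSuf_cons, heq]; simp [not_lt.mpr (not_lt.mp hgt)]
      · rw [hfold, ← hM', max_eq_right (not_lt.mp hgt)]
      · simpa using hget'
      · intro k hk hk0
        match k, hk0 with
        | (k' + 1), _ =>
          have h1 : (y :: z :: zs)[k' + 1] = (z :: zs)[k']'(by simpa using hk) := by simp
          rw [h1]
          exact hlast' k' (by simpa using hk) (by omega)

theorem inner_aux (l : List Int) (i M J : Int)
    (hJl : i + 1 ≤ J) (hJr : J < (l.length : Int))
    (hhit : PySem.List.pyGetD l J 0 = M)
    (hlast : ∀ k : Int, J < k → k < (l.length : Int) → PySem.List.pyGetD l k 0 ≠ M) :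
    ∀ (d : Nat) (t : Int), t - J = d → t < (l.length : Int) →
      mxInner l i M (PySem.List.pyRange t i (-1)) =
        some (PySem.List.pySetD (PySem.List.pySetD l i (PySem.List.pyGetD l J 0)) J
                (PySem.List.pyGetD l i 0)) := by
  intro d
  induction d with
  | zero =>
    intro t ht _
    have : t = J := by omega
    subst this
    rw [PySem.List.pyRange_neg_one_cons (by omega)]
    simp [mxInner, hhit]
  | succ d ihd =>
    intro t ht htn
    have hJt : J < t := by omega
    rw [PySem.List.pyRange_neg_one_cons (by omega)]
    have hne : PySem.List.pyGetD l t 0 ≠ M := hlast t hJt htn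
    simp only [mxInner, if_neg hne]
    exact ihd (t - 1) (by omega) (by omega)

theorem inner_eq (l : List Int) (i M J : Int)
    (hJl : i + 1 ≤ J) (hJr : J < (l.length : Int))
    (hhit : PySem.List.pyGetD l J 0 = M)
    (hlast : ∀ k : Int, J < k → k < (l.length : Int) → PySem.List.pyGetD l k 0 ≠ M) :
    mxInner l i M ((PySem.List.pyRange (i + 1) (l.length : Int) 1).reverse) =
      some (PySem.List.pySetD (PySem.List.pySetD l i (PySem.List.pyGetD l J 0)) J
              (PySem.List.pyGetD l i 0)) := by
  have hrev : (PySem.List.pyRange (i + 1) (l.length : Int) 1).reverse =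
      PySem.List.pyRange ((l.length : Int) - 1) i (-1) := by
    rw [PySem.List.pyRange_neg_one_eq_reverse]
    norm_num
  rw [hrev]
  exact inner_aux l i M J hJl hJr hhit hlast ((l.length : Int) - 1 - J).toNat ((l.length : Int) - 1) (Int.toNat_of_nonneg (by omega)).symm (by omega)

theorem loop_eq (l : List Int) : ∀ (xs : List Int) (i : Nat), l.drop i = xs →
    mxOuter l (PySem.List.pyRange (i : Int) ((l.length : Int) - 1) 1) =
      bScan l xs (bSuf xs (i : Int)) (i : Int) := by
  intro xs
  induction xs with
  | nil =>
    intro i hdrop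
    have hlen : l.length ≤ i := List.drop_eq_nil_iff.mp hdrop
    rw [PySem.List.pyRange_one_eq_nil (by omega)]
    simp [mxOuter, bScan]
  | cons x xs ih =>
    intro i hdrop
    have hi : i < l.length := by
      by_contra h
      rw [List.drop_eq_nil_iff.mpr (by omega)] at hdrop
      simp at hdrop
    have hlx : (l.drop i).length = l.length - i := List.length_drop ..
    rw [hdrop] at hlx
    match xs, ih with
    | [], _ =>
      have : l.length = i + 1 := by simp at hlx; omega
      rw [PySem.List.pyRange_one_eq_nil (by omega)]
      simp [mxOuter, bScan, bSuf]
    | y :: ys, ih =>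
      have hlen : l.length = i + ys.length + 2 := by simp at hlx; omega
      have hdrop1 : l.drop (i + 1) = y :: ys := by
        have : l.drop (i + 1) = (l.drop i).drop 1 := by
          rw [List.drop_drop]
        rw [this, hdrop]; rfl
      have hgx : PySem.List.pyGetD l (i : Int) 0 = x := by
        rw [PySem.List.pyGetD_natCast]
        have : l[i]? = some x := by
          have h0 : (l.drop i)[0]? = l[i + 0]? := List.getElem?_drop
          rw [hdrop] at h0
          simpa using h0.symm
        simp [List.getD, this]
      obtain ⟨M, r, tail, heqS, hM, hr, hget, hlastS⟩ := bSuf_spec ys y ((i : Int) + 1)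
      -- A side head reductions
      have hcast : (i : Int) + 1 = ((i + 1 : Nat) : Int) := by push_cast; ring
      have hslice : PySem.List.slice l (some ((i : Int) + 1)) none = y :: ys := by
        rw [hcast, PySem.List.slice_from_natCast, hdrop1]
      rw [PySem.List.pyRange_one_cons (by omega),
        mxOuter_cons_some l (i : Int) (ys.foldl max y) _ (by rw [hslice, PySem.List.max?_id_cons])]
      have hgJ : PySem.List.pyGetD l ((i : Int) + 1 + (r : Int)) 0 = M := by
        have h1 : (i : Int) + 1 + (r : Int) = ((i + 1 + r : Nat) : Int) := by push_cast; ring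
        rw [h1, PySem.List.pyGetD_natCast]
        have : l[i + 1 + r]? = some M := by
          have h2 : (l.drop (i + 1))[r]? = l[(i + 1) + r]? := List.getElem?_drop
          rw [hdrop1] at h2
          rw [← h2]
          exact hget
        simp [List.getD, this]
      by_cases hc : x < M ∧ M ≠ 0
      · -- swap branch on both sides
        have hcond : PySem.List.pyGetD l (i : Int) 0 < ys.foldl max y ∧ ys.foldl max y ≠ 0 := by
          rw [hgx, ← hM]; exact hc
        rw [if_pos hcond]
        have hinner := inner_eq l (i : Int) M ((i : Int) + 1 + (r : Int))
          (by omega) (by omega)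
          hgJ
          (by
            intro k hk1 hk2
            have hk0 : 0 ≤ k := by omega
            rw [PySem.List.pyGetD_eq_getElem l 0 hk0 hk2]
            have hkn : k.toNat < l.length := by omega
            have hk' : k.toNat - (i + 1) < ys.length + 1 := by omega
            have h2 : (l.drop (i + 1))[k.toNat - (i + 1)]? = l[(i + 1) + (k.toNat - (i + 1))]? :=
              List.getElem?_drop
            rw [hdrop1, show (i + 1) + (k.toNat - (i + 1)) = k.toNat by omega] at h2
            intro hbad
            apply hlastS (k.toNat - (i + 1)) (by simpa using hk') (by omega)
            have h3 : (y :: ys)[k.toNat - (i + 1)]? = some M := by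
              rw [h2, List.getElem?_eq_getElem hkn, hbad]
            simpa [List.getElem?_eq_getElem
              (show k.toNat - (i + 1) < (y :: ys).length by simpa using hk')] using h3)
        rw [← hM, hinner, bSuf_cons₂ x y ys (i : Int) M ((i : Int) + 1 + (r : Int)) tail heqS]
        by_cases hx : x > M
        · rw [if_pos hx, bScan_cons, if_pos hc, hgx]
        · rw [if_neg hx, bScan_cons, if_pos hc, hgx]
      · have hcond : ¬ (PySem.List.pyGetD l (i : Int) 0 < ys.foldl max y ∧ ys.foldl max y ≠ 0) := by
          rw [hgx, ← hM]; exact hc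
        rw [if_neg hcond]
        have hIH := ih (i + 1) hdrop1
        rw [← hcast] at hIH
        rw [hIH]
        rw [bSuf_cons₂ x y ys (i : Int) M ((i : Int) + 1 + (r : Int)) tail heqS, heqS]
        by_cases hx : x > M
        · rw [if_pos hx, bScan_cons, if_neg hc]
        · rw [if_neg hx, bScan_cons, if_neg hc]

-- ===== VERDICT (by name: the statement is the Claim_ definition above) =====
theorem mx_spec : Claim_equal_mx := by
  intro l _
  unfold Spec_mx mx mx_alt
  have h := loop_eq l l 0 (by simp)
  simpa using h
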